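-- pv_equiv track=rewrite | github.com/doozan/wikibot | list_mismatched_headlines.py | first_template_is_closed
-- ===== SOURCE A (Python) =====
-- def first_template_is_closed(line):
--     depth = 0
--
--     for c in line:
--         if c == "{":
--             depth += 1
--         elif c == "}":
--             depth -= 1
--             if depth == 0:
--                 return True
-- ===== SOURCE B (Python) =====
-- def first_template_is_closed(line):
--     for i, c in enumerate(line):
--         if c == "}" and line[:i+1].count("{") == line[:i+1].count("}"):
--             return True
-- ===== Notes on version B (the rewrite author's own statement) =====
-- stated objective: alternative
-- what changed: Drops the running depth counter entirely: for each closing brace B recounts both brace characters over the whole prefix with str.count and returns True at the first closer whose prefix holds equally many openers and closers (stateless nested-pass counting instead of a single-pass mutable counter).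
import Mathlib
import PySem

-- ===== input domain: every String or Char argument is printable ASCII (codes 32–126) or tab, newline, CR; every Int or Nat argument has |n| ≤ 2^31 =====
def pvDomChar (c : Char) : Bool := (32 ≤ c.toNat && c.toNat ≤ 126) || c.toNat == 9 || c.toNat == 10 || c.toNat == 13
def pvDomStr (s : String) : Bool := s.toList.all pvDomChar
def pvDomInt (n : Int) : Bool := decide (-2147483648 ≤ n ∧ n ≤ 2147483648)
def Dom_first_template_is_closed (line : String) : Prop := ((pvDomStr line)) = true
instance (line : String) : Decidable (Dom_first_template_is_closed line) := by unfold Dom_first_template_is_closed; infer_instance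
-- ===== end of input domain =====

-- B drops A's running depth counter: for each closing brace it recounts both brace characters over the whole prefix and fires at the first closer whose prefix is balanced (alternative, stateless but quadratic).
-- ===== PORT A =====
def pvALoop : List Char → Int → Option Bool
  | [], _ => none
  | c :: cs, depth =>
    if c = '{' then pvALoop cs (depth + 1)
    else if c = '}' then
      if depth - 1 = 0 then some true else pvALoop cs (depth - 1)
    else pvALoop cs depth

def first_template_is_closed (line : String) : Option Bool :=
  pvALoop line.toList 0

-- ===== PORT B =====
-- line[:i+1].count("{") with a one-character needle is exactly the character count of the slice
def pvBalancedClose (cs : List Char) (p : Int × Char) : Bool :=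
  p.2 == '}' &&
    ((PySem.List.slice cs none (some (p.1 + 1))).count '{' ==
     (PySem.List.slice cs none (some (p.1 + 1))).count '}')

def first_template_is_closed_alt (line : String) : Option Bool :=
  ((PySem.List.enumerate line.toList 0).find? (pvBalancedClose line.toList)).map (fun _ => true)

-- ===== PRECONDITION & SPEC =====
def Spec_first_template_is_closed (line : String) (out : Option Bool) : Prop := out = first_template_is_closed_alt line
instance (line : String) (out : Option Bool) : Decidable (Spec_first_template_is_closed line out) := by unfold Spec_first_template_is_closed; infer_instance

-- ===== CLAIM (what is proved, stated in full; the proofs are below) =====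
def Claim_equal_first_template_is_closed : Prop := ∀ (line : String), Dom_first_template_is_closed line → Spec_first_template_is_closed line (first_template_is_closed line)

-- ===== LEMMAS AND PROOFS =====

-- per-character depth delta
def pvDlt (c : Char) : Int := if c = '{' then 1 else if c = '}' then -1 else 0

-- "some prefix ends in '}' with running total d + (#'{' - #'}') = 0"
def pvP (cs : List Char) (d : Int) : Prop :=
  ∃ k, ∃ _ : k < cs.length, cs[k] = '}' ∧
    d + ((cs.take (k+1)).count '{' : Int) - ((cs.take (k+1)).count '}' : Int) = 0

theorem pvP_cons (c : Char) (cs : List Char) (d : Int) :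
    pvP (c :: cs) d ↔ (c = '}' ∧ d + pvDlt c = 0) ∨ pvP cs (d + pvDlt c) := by
  constructor
  · rintro ⟨k, hk, hc, hd⟩
    cases k with
    | zero =>
      left
      simp only [List.getElem_cons_zero] at hc
      subst hc
      refine ⟨rfl, ?_⟩
      simp only [List.take_succ_cons, List.take_zero, List.count_cons, List.count_nil, pvDlt] at hd ⊢
      simp_all
      omega
    | succ j =>
      right
      simp only [List.length_cons, Nat.succ_lt_succ_iff] at hk
      simp only [List.getElem_cons_succ] at hc
      refine ⟨j, hk, hc, ?_⟩
      simp only [List.take_succ_cons, List.count_cons, pvDlt] at hd ⊢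
      by_cases h1 : c = '{' <;> by_cases h2 : c = '}' <;> simp_all <;> omega
  · rintro (⟨hc, hd⟩ | ⟨k, hk, hc, hd⟩)
    · refine ⟨0, by simp, by simp [hc], ?_⟩
      subst hc
      simp only [List.take_succ_cons, List.take_zero, List.count_cons, List.count_nil, pvDlt] at hd ⊢
      simp_all
      omega
    · refine ⟨k + 1, by simpa using Nat.succ_lt_succ hk, by simpa using hc, ?_⟩
      simp only [List.take_succ_cons, List.count_cons, pvDlt] at hd ⊢
      by_cases h1 : c = '{' <;> by_cases h2 : c = '}' <;> simp_all <;> omega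

theorem pvALoop_true_iff (cs : List Char) : ∀ d : Int, pvALoop cs d = some true ↔ pvP cs d := by
  induction cs with
  | nil =>
    intro d
    simp only [pvALoop, pvP]
    constructor
    · intro h; exact absurd h (by simp)
    · rintro ⟨k, hk, -⟩; exact absurd hk (by simp)
  | cons c cs ih =>
    intro d
    rw [pvP_cons]
    simp only [pvALoop]
    by_cases h1 : c = '{'
    · subst h1
      rw [show pvDlt '{' = 1 from rfl]
      simp [ih]
    · by_cases h2 : c = '}'
      · subst h2
        rw [show pvDlt '}' = -1 from rfl]
        by_cases h3 : d - 1 = 0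
        · simp [h1, h3, show d + -1 = 0 from by omega]
        · simp [h1, h3, ih, show d + -1 = d - 1 from by ring]
      · have hδ : pvDlt c = 0 := by simp [pvDlt, h1, h2]
        simp [h1, h2, ih, hδ]

theorem pvALoop_shape (cs : List Char) : ∀ d : Int, pvALoop cs d = some true ∨ pvALoop cs d = none := by
  induction cs with
  | nil => intro d; right; rfl
  | cons c cs ih =>
    intro d
    simp only [pvALoop]
    split_ifs <;> first | exact Or.inl rfl | exact ih _

theorem pvBalancedClose_enum_iff (cs : List Char) (k : Nat) (hk : k < cs.length) :
    pvBalancedClose cs ((k : Int), cs[k]) = true ↔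
      (cs[k] = '}' ∧ (0 : Int) + ((cs.take (k+1)).count '{' : Int) - ((cs.take (k+1)).count '}' : Int) = 0) := by
  unfold pvBalancedClose
  have hcast : ((k : Int) + 1) = ((k + 1 : Nat) : Int) := by push_cast; ring
  rw [hcast, PySem.List.slice_to_natCast]
  simp only [Bool.and_eq_true, beq_iff_eq]
  constructor
  · rintro ⟨h1, h2⟩; exact ⟨h1, by omega⟩
  · rintro ⟨h1, h2⟩; exact ⟨h1, by omega⟩

theorem pvAlt_some_iff (line : String) :
    first_template_is_closed_alt line = some true ↔ pvP line.toList 0 := by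
  unfold first_template_is_closed_alt
  set cs := line.toList
  constructor
  · intro h
    rcases hf : (PySem.List.enumerate cs 0).find? (pvBalancedClose cs) with _ | p
    · rw [hf] at h; simp at h
    · have hmem := List.find?_some hf
      have hmem' := List.mem_of_find?_eq_some hf
      rw [PySem.List.mem_enumerate_iff] at hmem'
      rcases hmem' with ⟨k, hk, hp⟩
      subst hp
      simp only [zero_add] at hmem
      rw [pvBalancedClose_enum_iff cs k hk] at hmem
      exact ⟨k, hk, hmem.1, hmem.2⟩
  · rintro ⟨k, hk, hc, hd⟩
    have hmem : ((k : Int), cs[k]) ∈ PySem.List.enumerate cs 0 := by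
      rw [PySem.List.mem_enumerate_iff]
      exact ⟨k, hk, by simp⟩
    have hpred : pvBalancedClose cs ((k : Int), cs[k]) = true :=
      (pvBalancedClose_enum_iff cs k hk).mpr ⟨hc, hd⟩
    have : ∃ p ∈ PySem.List.enumerate cs 0, pvBalancedClose cs p = true := ⟨_, hmem, hpred⟩
    rw [← List.find?_isSome] at this
    rcases hf : (PySem.List.enumerate cs 0).find? (pvBalancedClose cs) with _ | p
    · rw [hf] at this; simp at this
    · simp

theorem pvAlt_shape (line : String) :
    first_template_is_closed_alt line = some true ∨ first_template_is_closed_alt line = none := by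
  unfold first_template_is_closed_alt
  rcases hf : (PySem.List.enumerate line.toList 0).find? (pvBalancedClose line.toList) with _ | p
  · right; simp
  · left; simp

-- ===== VERDICT (by name: the statement is the Claim_ definition above) =====
theorem first_template_is_closed_spec : Claim_equal_first_template_is_closed := by
  intro line _
  unfold Spec_first_template_is_closed
  by_cases hP : pvP line.toList 0
  · have hA : first_template_is_closed line = some true := by
      unfold first_template_is_closed
      exact (pvALoop_true_iff line.toList 0).mpr hP
    have hB : first_template_is_closed_alt line = some true := (pvAlt_some_iff line).mpr hP
    rw [hA, hB]
  · have hA : first_template_is_closed line = none := by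
      rcases pvALoop_shape line.toList 0 with h | h
      · exact absurd ((pvALoop_true_iff line.toList 0).mp h) hP
      · exact h
    have hB : first_template_is_closed_alt line = none := by
      rcases pvAlt_shape line with h | h
      · exact absurd ((pvAlt_some_iff line).mp h) hP
      · exact h
    rw [hA, hB]
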